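-- pv_equiv track=rewrite | github.com/4dn-dcic/utils | dcicutils/validation_utils.py | summary_of_data_validation_errors
-- ===== SOURCE A (Python) =====
-- from typing import Dict, List, Optional
--
-- def summary_of_data_validation_errors(data_validation_errors: Dict,
--                                       # These next three items are available from a portal's SubmissionFolio
--                                       data_file_name: Optional[str] = None,
--                                       s3_data_file_location: Optional[str] = None,
--                                       s3_details_location: Optional[str] = None) -> List[str]:
--     """
--     Summarize the given data validation errors into a simple short list of English phrases;
--     this will end up going into the additional_properties of the IngestionSubmission object
--     in the Portal database (see SubmissionFolio.record_results); this is what will get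
--     displayed, if any errors, by the submitr tool when it detects processing has completed.
--     """
--     errors = data_validation_errors.get("errors")
--     if not errors:
--         return []
--
--     unidentified_count = 0
--     missing_properties_count = 0
--     extraneous_properties_count = 0
--     unclassified_error_count = 0
--     exception_count = 0
--
--     for error in errors:
--         if error.get("unidentified"):
--             unidentified_count += 1
--         if error.get("missing_properties"):
--             missing_properties_count += 1
--         if error.get("extraneous_properties"):
--             extraneous_properties_count += 1
--         if error.get("unclassified_error"):
--             unclassified_error_count += 1
--         if error.get("exception"):
--             exception_count += 1
--
--     result = [
--         f"Ingestion data validation error summary:"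
--     ]
--     if data_file_name:
--         result.append(f"Data file: {data_file_name}")
--     if s3_data_file_location:
--         result.append(f"Data file in S3: {s3_data_file_location}")
--     result = result + [
--         f"Items unidentified: {unidentified_count}",
--         f"Items missing properties: {missing_properties_count}",
--         f"Items with extraneous properties: {extraneous_properties_count}",
--         f"Other errors: {unclassified_error_count}",
--         f"Exceptions: {exception_count}",
--     ]
--     if s3_details_location:
--         result.append(f"Details: {s3_details_location}")
--
--     return result
-- ===== SOURCE B (Python) =====
-- def _opt_line(prefix, value):
--     return [f"{prefix}{value}"] if value else []
--
--
-- def summary_of_data_validation_errors(data_validation_errors,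
--                                       data_file_name=None,
--                                       s3_data_file_location=None,
--                                       s3_details_location=None):
--     errors = data_validation_errors.get("errors")
--     if not errors:
--         return []
--
--     def count(key):
--         return sum(1 for error in errors if error.get(key))
--
--     return (["Ingestion data validation error summary:"]
--             + _opt_line("Data file: ", data_file_name)
--             + _opt_line("Data file in S3: ", s3_data_file_location)
--             + [f"Items unidentified: {count('unidentified')}",
--                f"Items missing properties: {count('missing_properties')}",
--                f"Items with extraneous properties: {count('extraneous_properties')}",
--                f"Other errors: {count('unclassified_error')}",
--                f"Exceptions: {count('exception')}"]
--             + _opt_line("Details: ", s3_details_location))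
-- ===== Notes on version B (the rewrite author's own statement) =====
-- stated objective: idiomatic
-- what changed: Replaces A's imperative single five-counter accumulation loop and repeated result.append mutation with a declarative build: one per-category count comprehension per summary line and concatenation of optional-line segments.
import Mathlib
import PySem

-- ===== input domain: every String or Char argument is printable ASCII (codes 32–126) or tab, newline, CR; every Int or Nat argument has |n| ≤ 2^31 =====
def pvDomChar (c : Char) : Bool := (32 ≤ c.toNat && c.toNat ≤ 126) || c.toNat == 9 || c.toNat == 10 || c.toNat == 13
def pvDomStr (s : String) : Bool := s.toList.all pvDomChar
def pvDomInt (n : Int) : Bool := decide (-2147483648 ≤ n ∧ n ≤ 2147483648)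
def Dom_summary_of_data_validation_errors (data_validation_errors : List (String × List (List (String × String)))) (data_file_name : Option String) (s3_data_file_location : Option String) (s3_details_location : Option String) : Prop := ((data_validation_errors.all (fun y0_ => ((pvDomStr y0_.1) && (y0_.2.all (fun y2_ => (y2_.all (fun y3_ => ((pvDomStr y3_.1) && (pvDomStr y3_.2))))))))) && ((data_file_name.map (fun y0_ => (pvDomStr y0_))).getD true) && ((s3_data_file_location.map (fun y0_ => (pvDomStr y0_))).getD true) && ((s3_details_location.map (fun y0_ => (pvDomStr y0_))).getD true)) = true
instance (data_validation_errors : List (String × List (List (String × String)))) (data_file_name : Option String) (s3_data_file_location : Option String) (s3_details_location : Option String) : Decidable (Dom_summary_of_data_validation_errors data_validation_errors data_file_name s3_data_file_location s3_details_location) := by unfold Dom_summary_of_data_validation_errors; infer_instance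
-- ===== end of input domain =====

-- B: idiomatic decomposition — the single five-counter loop is replaced by independent per-category counts; same output.


-- ===== PORT A =====
def pvLookup {V : Type} (d : List (String × V)) (k : String) : Option V :=
  (d.find? (fun p => p.1 == k)).map (·.2)

-- truthiness of `error.get(key)` (a str or None): some nonempty string
def pvGetTruthy (error : List (String × String)) (key : String) : Bool :=
  match pvLookup error key with
  | some v => !(v == "")
  | none => false

-- A's single accumulation loop over `errors`, carrying the five counters
def pvCountLoop (errors : List (List (String × String))) :
    Nat × Nat × Nat × Nat × Nat :=
  errors.foldl
    (fun acc error =>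
      let (u, m, x, o, e) := acc
      let u := if pvGetTruthy error "unidentified" then u + 1 else u
      let m := if pvGetTruthy error "missing_properties" then m + 1 else m
      let x := if pvGetTruthy error "extraneous_properties" then x + 1 else x
      let o := if pvGetTruthy error "unclassified_error" then o + 1 else o
      let e := if pvGetTruthy error "exception" then e + 1 else e
      (u, m, x, o, e))
    (0, 0, 0, 0, 0)

def summary_of_data_validation_errors (data_validation_errors : List (String × List (List (String × String)))) (data_file_name : Option String) (s3_data_file_location : Option String) (s3_details_location : Option String) : List String :=
  match pvLookup data_validation_errors "errors" with
  | none => []      -- `if not errors` (None)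
  | some [] => []   -- `if not errors` (empty list)
  | some errors =>
    let (u, m, x, o, e) := pvCountLoop errors
    let result := ["Ingestion data validation error summary:"]
    let result := match data_file_name with
      | some s => if s ≠ "" then result ++ ["Data file: " ++ s] else result
      | none => result
    let result := match s3_data_file_location with
      | some s => if s ≠ "" then result ++ ["Data file in S3: " ++ s] else result
      | none => result
    let result := result ++
      ["Items unidentified: " ++ toString u,
       "Items missing properties: " ++ toString m,
       "Items with extraneous properties: " ++ toString x,
       "Other errors: " ++ toString o,
       "Exceptions: " ++ toString e]
    match s3_details_location with
      | some s => if s ≠ "" then result ++ ["Details: " ++ s] else result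
      | none => result

-- ===== PORT B =====
def pvLookupB {V : Type} (d : List (String × V)) (k : String) : Option V :=
  (d.find? (fun p => p.1 == k)).map (·.2)

def pvGetTruthyB (error : List (String × String)) (key : String) : Bool :=
  match pvLookupB error key with
  | some v => !(v == "")
  | none => false

-- B: per-category count, `sum(1 for error in errors if error.get(key))`
def pvCount (errors : List (List (String × String))) (key : String) : Nat :=
  (errors.filter (fun error => pvGetTruthyB error key)).length

-- `result.append(f"{pre}{s}")` guarded by truthiness of an optional string
def pvOptLine (pre : String) (o : Option String) : List String :=
  match o with
  | some s => if s ≠ "" then [pre ++ s] else []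
  | none => []

def summary_of_data_validation_errors_alt (data_validation_errors : List (String × List (List (String × String)))) (data_file_name : Option String) (s3_data_file_location : Option String) (s3_details_location : Option String) : List String :=
  match pvLookupB data_validation_errors "errors" with
  | some (e0 :: rest) =>
    let errors := e0 :: rest
    ["Ingestion data validation error summary:"]
      ++ pvOptLine "Data file: " data_file_name
      ++ pvOptLine "Data file in S3: " s3_data_file_location
      ++ ["Items unidentified: " ++ toString (pvCount errors "unidentified"),
          "Items missing properties: " ++ toString (pvCount errors "missing_properties"),
          "Items with extraneous properties: " ++ toString (pvCount errors "extraneous_properties"),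
          "Other errors: " ++ toString (pvCount errors "unclassified_error"),
          "Exceptions: " ++ toString (pvCount errors "exception")]
      ++ pvOptLine "Details: " s3_details_location
  | _ => []   -- `if not errors: return []`

-- ===== PRECONDITION & SPEC =====
def Spec_summary_of_data_validation_errors (data_validation_errors : List (String × List (List (String × String)))) (data_file_name : Option String) (s3_data_file_location : Option String) (s3_details_location : Option String) (out : List String) : Prop := out = summary_of_data_validation_errors_alt data_validation_errors data_file_name s3_data_file_location s3_details_location
instance (data_validation_errors : List (String × List (List (String × String)))) (data_file_name : Option String) (s3_data_file_location : Option String) (s3_details_location : Option String) (out : List String) : Decidable (Spec_summary_of_data_validation_errors data_validation_errors data_file_name s3_data_file_location s3_details_location out) := by unfold Spec_summary_of_data_validation_errors; infer_instance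

-- ===== CLAIM (what is proved, stated in full; the proofs are below) =====
def Claim_equal_summary_of_data_validation_errors : Prop := ∀ (data_validation_errors : List (String × List (List (String × String)))) (data_file_name : Option String) (s3_data_file_location : Option String) (s3_details_location : Option String), Dom_summary_of_data_validation_errors data_validation_errors data_file_name s3_data_file_location s3_details_location → Spec_summary_of_data_validation_errors data_validation_errors data_file_name s3_data_file_location s3_details_location (summary_of_data_validation_errors data_validation_errors data_file_name s3_data_file_location s3_details_location)

-- ===== LEMMAS AND PROOFS =====
-- B's copies of the lookup/truthiness helpers are definitionally A's
theorem pvLookupB_eq {V : Type} (d : List (String × V)) (k : String) : pvLookupB d k = pvLookup d k := rfl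
theorem pvGetTruthyB_eq (e : List (String × String)) (k : String) : pvGetTruthyB e k = pvGetTruthy e k := rfl
-- A's fold from an arbitrary accumulator adds B's five per-key counts componentwise
theorem pvCountLoop_gen (errors : List (List (String × String)))
    (u m x o e : Nat) :
    errors.foldl
      (fun acc error =>
        let (u, m, x, o, e) := acc
        let u := if pvGetTruthy error "unidentified" then u + 1 else u
        let m := if pvGetTruthy error "missing_properties" then m + 1 else m
        let x := if pvGetTruthy error "extraneous_properties" then x + 1 else x
        let o := if pvGetTruthy error "unclassified_error" then o + 1 else o
        let e := if pvGetTruthy error "exception" then e + 1 else e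
        (u, m, x, o, e))
      (u, m, x, o, e)
    = (u + pvCount errors "unidentified",
       m + pvCount errors "missing_properties",
       x + pvCount errors "extraneous_properties",
       o + pvCount errors "unclassified_error",
       e + pvCount errors "exception") := by
  induction errors generalizing u m x o e with
  | nil => simp [pvCount]
  | cons hd tl ih =>
    simp only [List.foldl_cons, ih, pvCount, List.filter_cons, pvGetTruthyB_eq]
    split_ifs <;> simp <;> omega

theorem pvCountLoop_eq (errors : List (List (String × String))) :
    pvCountLoop errors
    = (pvCount errors "unidentified",
       pvCount errors "missing_properties",
       pvCount errors "extraneous_properties",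
       pvCount errors "unclassified_error",
       pvCount errors "exception") := by
  simpa using pvCountLoop_gen errors 0 0 0 0 0


-- ===== VERDICT (by name: the statement is the Claim_ definition above) =====
theorem summary_of_data_validation_errors_spec : Claim_equal_summary_of_data_validation_errors := by
  intro dve dfn s3d s3det _hdom
  unfold Spec_summary_of_data_validation_errors
  unfold summary_of_data_validation_errors summary_of_data_validation_errors_alt
  rw [pvLookupB_eq]
  cases h : pvLookup dve "errors" with
  | none => rfl
  | some errors =>
    cases errors with
    | nil => rfl
    | cons hd tl =>
      simp only [pvCountLoop_eq]
      cases dfn <;> cases s3d <;> cases s3det <;>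
        simp [pvOptLine] <;> split_ifs <;> simp
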